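-- pv_equiv track=rewrite | github.com/eqmvii/claudiablot | read_loot.py | absorb_narrow
-- ===== SOURCE A (Python) =====
-- def absorb_narrow(segs: list, min_w: int) -> list:
--     """Merge very narrow blobs (likely 'i' dots or serifs) into the nearest blob."""
--     if not segs:
--         return segs
--     changed = True
--     while changed:
--         changed = False
--         out = [segs[0][:]]
--         for s in segs[1:]:
--             prev = out[-1]
--             if s[1] - s[0] + 1 < min_w:
--                 # merge narrow blob into previous (extend previous rightward)
--                 prev[1] = s[1]
--                 changed = True
--             elif prev[1] - prev[0] + 1 < min_w:
--                 # previous was narrow — merge into current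
--                 out[-1] = [prev[0], s[1]]
--                 changed = True
--             else:
--                 out.append(s[:])
--         segs = out
--     return segs
-- ===== SOURCE B (Python) =====
-- def absorb_narrow(segs: list, min_w: int) -> list:
--     """Merge very narrow blobs into the nearest blob: one left-to-right pass,
--     then absorb a trailing narrow segment chain — no fixpoint loop."""
--     if not segs:
--         return segs
--     out = [segs[0][:]]
--     for s in segs[1:]:
--         prev = out[-1]
--         if s[1] - s[0] + 1 < min_w:
--             prev[1] = s[1]
--         elif prev[1] - prev[0] + 1 < min_w:
--             out[-1] = [prev[0], s[1]]
--         else: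
--             out.append(s[:])
--     while len(out) > 1 and out[-1][1] - out[-1][0] + 1 < min_w:
--         last = out.pop()
--         out[-1][1] = last[1]
--     return out
-- ===== Notes on version B (the rewrite author's own statement) =====
-- stated objective: simpler
-- what changed: Replaced the outer while-changed fixpoint loop (which rescans all segments each round) by a single left-to-right merging pass followed by a small trailing loop that absorbs a final narrow-segment chain; this is exact because after one pass every segment except the last is wide, so later passes can only fold the trailing narrow segment into its predecessor.
import Mathlib
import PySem

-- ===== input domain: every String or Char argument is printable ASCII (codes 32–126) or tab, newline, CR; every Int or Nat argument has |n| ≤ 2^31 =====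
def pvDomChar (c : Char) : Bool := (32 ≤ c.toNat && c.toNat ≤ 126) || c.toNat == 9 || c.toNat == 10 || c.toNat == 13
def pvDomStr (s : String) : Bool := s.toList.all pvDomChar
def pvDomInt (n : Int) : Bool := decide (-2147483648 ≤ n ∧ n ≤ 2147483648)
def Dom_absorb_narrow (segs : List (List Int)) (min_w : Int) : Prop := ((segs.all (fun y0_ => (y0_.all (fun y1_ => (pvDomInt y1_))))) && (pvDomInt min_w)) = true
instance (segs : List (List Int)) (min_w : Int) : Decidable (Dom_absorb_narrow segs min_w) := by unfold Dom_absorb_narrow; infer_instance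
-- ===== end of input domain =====

-- B replaces A's while-changed fixpoint loop by one merging pass plus a trailing
-- absorption loop (objective: simpler). Neither program mutates its argument
-- (A copies segments with s[:]); the equivalence is about the return value.

-- ===== PORT A =====
-- one iteration of A's inner `for s in segs[1:]` loop; state = (out reversed, changed)
def stepA (min_w : Int) (st : List (List Int) × Bool) (s : List Int) : List (List Int) × Bool :=
  let prev := st.1.headD []
  if PySem.List.pyGetD s 1 0 - PySem.List.pyGetD s 0 0 + 1 < min_w then
    ((prev.set 1 (PySem.List.pyGetD s 1 0)) :: st.1.tail, true)
  else if PySem.List.pyGetD prev 1 0 - PySem.List.pyGetD prev 0 0 + 1 < min_w then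
    ([PySem.List.pyGetD prev 0 0, PySem.List.pyGetD s 1 0] :: st.1.tail, true)
  else
    (s :: st.1, st.2)

-- one body of A's `while changed` loop: `out = [segs[0][:]]; for s in segs[1:]: …`
def passA (min_w : Int) (segs : List (List Int)) : List (List Int) × Bool :=
  match segs with
  | [] => ([], false)
  | h :: t =>
    let p := t.foldl (stepA min_w) ([h], false)
    (p.1.reverse, p.2)

-- length facts needed by loopA's termination proof
theorem stepA_foldl_len (min_w : Int) :
    ∀ (t : List (List Int)) (o : List (List Int)) (c : Bool),
      (t.foldl (stepA min_w) (o, c)).1.length ≤ o.length + t.length ∧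
      (o ≠ [] → c = false → (t.foldl (stepA min_w) (o, c)).2 = true →
        (t.foldl (stepA min_w) (o, c)).1.length < o.length + t.length) := by
  intro t
  induction t with
  | nil => intro o c; simp
  | cons s ts ih =>
    intro o c
    simp only [List.foldl_cons]
    by_cases h1 : PySem.List.pyGetD s 1 0 - PySem.List.pyGetD s 0 0 + 1 < min_w
    · have hs : stepA min_w (o, c) s = ((o.headD []).set 1 (PySem.List.pyGetD s 1 0) :: o.tail, true) := by
        simp [stepA, h1]
      rw [hs]
      refine ⟨?_, ?_⟩
      · calc (ts.foldl (stepA min_w) (((o.headD []).set 1 (PySem.List.pyGetD s 1 0)) :: o.tail, true)).1.length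
            ≤ (((o.headD []).set 1 (PySem.List.pyGetD s 1 0)) :: o.tail).length + ts.length := (ih _ _).1
          _ ≤ o.length + (s :: ts).length := by
              simp only [List.length_cons]
              have : o.tail.length ≤ o.length := by
                cases o <;> simp
              omega
      · intro ho _ _
        have h1' := (ih (((o.headD []).set 1 (PySem.List.pyGetD s 1 0)) :: o.tail) true).1
        have : o.tail.length + 1 = o.length := by
          cases o with
          | nil => exact absurd rfl ho
          | cons a b => simp
        simp only [List.length_cons] at h1' ⊢
        omega
    · by_cases h2 : PySem.List.pyGetD (o.headD []) 1 0 - PySem.List.pyGetD (o.headD []) 0 0 + 1 < min_w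
      · have hs : stepA min_w (o, c) s =
            ([PySem.List.pyGetD (o.headD []) 0 0, PySem.List.pyGetD s 1 0] :: o.tail, true) := by
          simp only [stepA]; rw [if_neg h1, if_pos h2]
        rw [hs]
        refine ⟨?_, ?_⟩
        · have h1' := (ih ([PySem.List.pyGetD (o.headD []) 0 0, PySem.List.pyGetD s 1 0] :: o.tail) true).1
          have : o.tail.length ≤ o.length := by cases o <;> simp
          simp only [List.length_cons] at h1' ⊢
          omega
        · intro ho _ _
          have h1' := (ih ([PySem.List.pyGetD (o.headD []) 0 0, PySem.List.pyGetD s 1 0] :: o.tail) true).1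
          have : o.tail.length + 1 = o.length := by
            cases o with
            | nil => exact absurd rfl ho
            | cons a b => simp
          simp only [List.length_cons] at h1' ⊢
          omega
      · have hs : stepA min_w (o, c) s = (s :: o, c) := by
          simp only [stepA]; rw [if_neg h1, if_neg h2]
        rw [hs]
        refine ⟨?_, ?_⟩
        · have h1' := (ih (s :: o) c).1
          simp only [List.length_cons] at h1' ⊢
          omega
        · intro _ hc hch
          have h2' := (ih (s :: o) c).2 (by simp) hc hch
          simp only [List.length_cons] at h2' ⊢
          omega

theorem passA_shrink (min_w : Int) (segs : List (List Int)) :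
    (passA min_w segs).2 = true → (passA min_w segs).1.length < segs.length := by
  cases segs with
  | nil => simp [passA]
  | cons h t =>
    intro hc
    simp only [passA] at hc ⊢
    have := (stepA_foldl_len min_w t [h] false).2 (by simp) rfl hc
    simp only [List.length_cons, List.length_nil, List.length_reverse] at this ⊢
    omega

-- A's `while changed:` loop (each changed pass strictly shortens its list)
def loopA (min_w : Int) (segs : List (List Int)) : List (List Int) :=
  let p := passA min_w segs
  if h : p.2 = true then loopA min_w p.1 else p.1
termination_by segs.length
decreasing_by exact passA_shrink min_w segs h

def absorb_narrow (segs : List (List Int)) (min_w : Int) : List (List Int) :=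
  if segs = [] then segs else loopA min_w segs

-- ===== PORT B =====
-- one iteration of B's single merging pass; state = out reversed
def stepB (min_w : Int) (outRev : List (List Int)) (s : List Int) : List (List Int) :=
  let prev := outRev.headD []
  if PySem.List.pyGetD s 1 0 - PySem.List.pyGetD s 0 0 + 1 < min_w then
    (prev.set 1 (PySem.List.pyGetD s 1 0)) :: outRev.tail
  else if PySem.List.pyGetD prev 1 0 - PySem.List.pyGetD prev 0 0 + 1 < min_w then
    [PySem.List.pyGetD prev 0 0, PySem.List.pyGetD s 1 0] :: outRev.tail
  else
    s :: outRev

-- B's trailing `while len(out) > 1 and out[-1] narrow` loop, on the reversed list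
def absorbTailRev (min_w : Int) : List (List Int) → List (List Int)
  | a :: b :: rest =>
    if PySem.List.pyGetD a 1 0 - PySem.List.pyGetD a 0 0 + 1 < min_w then
      absorbTailRev min_w ((b.set 1 (PySem.List.pyGetD a 1 0)) :: rest)
    else a :: b :: rest
  | l => l
termination_by l => l.length

def absorb_narrow_alt (segs : List (List Int)) (min_w : Int) : List (List Int) :=
  match segs with
  | [] => []
  | h :: t => (absorbTailRev min_w (t.foldl (stepB min_w) [h])).reverse

-- ===== PRECONDITION & SPEC =====
-- Pre_ excludes exactly the inputs where Python A raises IndexError: two or more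
-- segments with some segment shorter than 2 (with ≤ 1 segments nothing is indexed).
def Pre_absorb_narrow (segs : List (List Int)) (min_w : Int) : Prop :=
  segs.length ≤ 1 ∨ ∀ l ∈ segs, 2 ≤ l.length

instance (segs : List (List Int)) (min_w : Int) : Decidable (Pre_absorb_narrow segs min_w) := by
  unfold Pre_absorb_narrow; infer_instance

def pvWitness_absorb_narrow : List (List Int) × Int := ([[0, 4], [5, 5], [7, 12]], 3)

def Spec_absorb_narrow (segs : List (List Int)) (min_w : Int) (out : List (List Int)) : Prop :=
  out = absorb_narrow_alt segs min_w

instance (segs : List (List Int)) (min_w : Int) (out : List (List Int)) : Decidable (Spec_absorb_narrow segs min_w out) := by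
  unfold Spec_absorb_narrow; infer_instance

-- ===== CLAIM (what is proved, stated in full; the proofs are below) =====
def Claim_equal_absorb_narrow : Prop := ∀ (segs : List (List Int)) (min_w : Int), Dom_absorb_narrow segs min_w → Pre_absorb_narrow segs min_w → Spec_absorb_narrow segs min_w (absorb_narrow segs min_w)

-- ===== LEMMAS AND PROOFS =====

-- "narrow" as A and B test it
def Nrw (min_w : Int) (l : List Int) : Prop :=
  PySem.List.pyGetD l 1 0 - PySem.List.pyGetD l 0 0 + 1 < min_w

-- stepA's list component is exactly stepB
theorem stepA_fst (min_w : Int) (st : List (List Int) × Bool) (s : List Int) :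
    (stepA min_w st s).1 = stepB min_w st.1 s := by
  simp only [stepA, stepB]
  split_ifs <;> rfl

theorem foldl_stepA_fst (min_w : Int) :
    ∀ (t : List (List Int)) (o : List (List Int)) (c : Bool),
      (t.foldl (stepA min_w) (o, c)).1 = t.foldl (stepB min_w) o := by
  intro t
  induction t with
  | nil => intro o c; rfl
  | cons s ts ih =>
    intro o c
    simp only [List.foldl_cons]
    have := stepA_fst min_w (o, c) s
    rw [show stepA min_w (o, c) s = ((stepA min_w (o, c) s).1, (stepA min_w (o, c) s).2) from rfl, this]
    exact ih _ _

-- once changed is true it stays true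
theorem foldl_stepA_true (min_w : Int) :
    ∀ (t : List (List Int)) (o : List (List Int)),
      (t.foldl (stepA min_w) (o, true)).2 = true := by
  intro t
  induction t with
  | nil => intro o; rfl
  | cons s ts ih =>
    intro o
    simp only [List.foldl_cons, stepA]
    split_ifs <;> exact ih _

-- the result list is nonempty when the seed is
theorem foldl_stepA_ne_nil (min_w : Int) :
    ∀ (t : List (List Int)) (o : List (List Int)) (c : Bool), o ≠ [] →
      (t.foldl (stepA min_w) (o, c)).1 ≠ [] := by
  intro t
  induction t with
  | nil => intro o c ho; simpa using ho
  | cons s ts ih =>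
    intro o c ho
    simp only [List.foldl_cons, stepA]
    split_ifs <;> exact ih _ _ (by simp)

-- invariant: every NON-HEAD element of the (reversed) out list is wide
theorem foldl_stepA_wideTail (min_w : Int) :
    ∀ (t : List (List Int)) (o : List (List Int)) (c : Bool),
      (∀ l ∈ o.tail, ¬ Nrw min_w l) →
      ∀ l ∈ (t.foldl (stepA min_w) (o, c)).1.tail, ¬ Nrw min_w l := by
  intro t
  induction t with
  | nil => intro o c h; exact h
  | cons s ts ih =>
    intro o c h
    simp only [List.foldl_cons, stepA]
    split_ifs with h1 h2
    · exact ih _ _ (by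
        intro l hl
        simp only [List.tail_cons] at hl
        exact h l (by
          cases o with
          | nil => simp at hl
          | cons a b => exact hl))
    · exact ih _ _ (by
        intro l hl
        simp only [List.tail_cons] at hl
        exact h l (by
          cases o with
          | nil => simp at hl
          | cons a b => exact hl))
    · exact ih _ _ (by
        intro l hl
        simp only [List.tail_cons] at hl
        cases o with
        | nil => simp at hl
        | cons a b =>
          rcases List.mem_cons.mp hl with rfl | hb
          · simpa [Nrw] using h2
          · exact h l hb)

-- a pass over all-wide data just reverses it back and changes nothing
theorem foldl_stepA_id (min_w : Int) :
    ∀ (t : List (List Int)) (o : List (List Int)) (c : Bool), o ≠ [] →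
      (∀ l ∈ t, ¬ Nrw min_w l) → (∀ l ∈ o, ¬ Nrw min_w l) →
      t.foldl (stepA min_w) (o, c) = (t.reverse ++ o, c) := by
  intro t
  induction t with
  | nil => intro o c _ _ _; simp
  | cons s ts ih =>
    intro o c ho ht hw
    have hsw : ¬ Nrw min_w s := ht s (by simp)
    have hpw : ¬ Nrw min_w (o.headD []) := by
      cases o with
      | nil => exact absurd rfl ho
      | cons a b => exact hw a (by simp)
    simp only [List.foldl_cons, stepA]
    rw [if_neg (by simpa [Nrw] using hsw), if_neg (by simpa [Nrw] using hpw)]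
    rw [ih (s :: o) c (by simp) (fun l hl => ht l (by simp [hl]))
        (fun l hl => by
          rcases List.mem_cons.mp hl with rfl | hb
          · exact hsw
          · exact hw l hb)]
    simp

-- if a pass reports no change, it returned its input (all of which is then wide, when nonempty past the head)
theorem foldl_stepA_unchanged (min_w : Int) :
    ∀ (t : List (List Int)) (o : List (List Int)) (c : Bool),
      (t.foldl (stepA min_w) (o, c)).2 = false →
      t.foldl (stepA min_w) (o, c) = (t.reverse ++ o, c) ∧ ∀ l ∈ t, ¬ Nrw min_w l := by
  intro t
  induction t with
  | nil => intro o c _; simp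
  | cons s ts ih =>
    intro o c hc
    simp only [List.foldl_cons, stepA] at hc ⊢
    split_ifs at hc ⊢ with h1 h2
    · rw [foldl_stepA_true] at hc; exact absurd hc (by simp)
    · rw [foldl_stepA_true] at hc; exact absurd hc (by simp)
    · obtain ⟨heq, hts⟩ := ih (s :: o) c hc
      refine ⟨by rw [heq]; simp, ?_⟩
      intro l hl
      rcases List.mem_cons.mp hl with rfl | hb
      · simpa [Nrw] using h1
      · exact hts l hb

-- one changed step of A's later passes: a trailing narrow segment is absorbed
theorem passA_tail_merge (min_w : Int) (b a : List Int) (rest : List (List Int))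
    (hw : ∀ l ∈ b :: rest, ¬ Nrw min_w l) (ha : Nrw min_w a) :
    passA min_w ((b :: rest).reverse ++ [a]) =
      (((b.set 1 (PySem.List.pyGetD a 1 0)) :: rest).reverse, true) := by
  obtain ⟨h, t'', hu⟩ : ∃ h t'', (b :: rest).reverse = h :: t'' := by
    cases hr : (b :: rest).reverse with
    | nil => simp at hr
    | cons x y => exact ⟨x, y, rfl⟩
  rw [hu]
  simp only [List.cons_append, passA]
  rw [List.foldl_append]
  have hall : ∀ l ∈ h :: t'', ¬ Nrw min_w l := by
    intro l hl
    exact hw l (List.mem_reverse.mp (hu ▸ hl))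
  rw [foldl_stepA_id min_w t'' [h] false (by simp)
      (fun l hl => hall l (by simp [hl])) (by
        intro l hl
        simp only [List.mem_singleton] at hl
        exact hall l (by simp [hl]))]
  have hrev : t''.reverse ++ [h] = b :: rest := by
    have : (h :: t'').reverse = b :: rest := by
      rw [← hu]; simp
    simpa using this
  simp only [List.foldl_cons, List.foldl_nil, stepA, hrev]
  rw [if_pos (by simpa [Nrw] using ha)]
  simp

-- the core correspondence: on a list whose non-last (forward) elements are all wide,
-- A's remaining passes compute exactly B's trailing absorption
theorem loopA_eq_absorbTailRev (min_w : Int) :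
    ∀ (n : Nat) (o : List (List Int)), o.length ≤ n → o ≠ [] → (∀ l ∈ o.tail, ¬ Nrw min_w l) →
      loopA min_w o.reverse = (absorbTailRev min_w o).reverse := by
  intro n
  induction n with
  | zero =>
    intro o hlen ho _
    exact absurd (List.eq_nil_of_length_eq_zero (Nat.le_zero.mp hlen)) ho
  | succ n IH =>
    intro o hlen ho hw
    match o with
    | [] => exact absurd rfl ho
    | [x] =>
      rw [loopA]
      simp only [List.reverse_singleton, passA, List.foldl_nil]
      rw [dif_neg (by simp)]
      simp [absorbTailRev]
    | a :: b :: rest =>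
      have hwbr : ∀ l ∈ b :: rest, ¬ Nrw min_w l := by simpa using hw
      by_cases hna : Nrw min_w a
      · -- trailing narrow: one pass merges a into b, recurse
        have hrw : (a :: b :: rest).reverse = (b :: rest).reverse ++ [a] := by simp
        rw [loopA, hrw]
        have hp := passA_tail_merge min_w b a rest hwbr hna
        rw [show passA min_w ((b :: rest).reverse ++ [a]) =
              (((b.set 1 (PySem.List.pyGetD a 1 0)) :: rest).reverse, true) from hp]
        rw [dif_pos rfl]
        have hIH := IH ((b.set 1 (PySem.List.pyGetD a 1 0)) :: rest)
          (by simp only [List.length_cons] at hlen ⊢; omega) (by simp)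
          (by
            intro l hl
            exact hwbr l (by simp only [List.tail_cons] at hl; exact List.mem_cons_of_mem _ hl))
        rw [hIH]
        have : absorbTailRev min_w (a :: b :: rest) =
            absorbTailRev min_w ((b.set 1 (PySem.List.pyGetD a 1 0)) :: rest) := by
          rw [absorbTailRev]
          rw [if_pos (by simpa [Nrw] using hna)]
        rw [this]
      · -- everything wide: the pass is the identity, and so is the trailing loop
        have hall : ∀ l ∈ a :: b :: rest, ¬ Nrw min_w l := by
          intro l hl
          rcases List.mem_cons.mp hl with rfl | hb
          · exact hna
          · exact hwbr l hb
        obtain ⟨h, t, hu⟩ : ∃ h t, (a :: b :: rest).reverse = h :: t := by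
          cases hr : (a :: b :: rest).reverse with
          | nil => simp at hr
          | cons x y => exact ⟨x, y, rfl⟩
        have hallu : ∀ l ∈ h :: t, ¬ Nrw min_w l := by
          intro l hl
          exact hall l (by
            have : l ∈ (a :: b :: rest).reverse := by rw [hu]; exact hl
            exact List.mem_reverse.mp this)
        rw [loopA, hu]
        simp only [passA]
        rw [foldl_stepA_id min_w t [h] false (by simp)
            (fun l hl => hallu l (by simp [hl]))
            (by intro l hl; simp only [List.mem_singleton] at hl; exact hallu l (by simp [hl]))]
        rw [dif_neg (by simp)]
        have : absorbTailRev min_w (a :: b :: rest) = a :: b :: rest := by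
          rw [absorbTailRev, if_neg (by simpa [Nrw] using hna)]
        rw [this]
        have : (t.reverse ++ [h]).reverse = h :: t := by simp
        rw [this, ← hu]

-- ===== VERDICT (by name: the statement is the Claim_ definition above) =====
theorem absorb_narrow_spec : Claim_equal_absorb_narrow := by
  intro segs min_w _ _
  unfold Spec_absorb_narrow absorb_narrow
  cases segs with
  | nil => simp [absorb_narrow_alt]
  | cons h t =>
    rw [if_neg (by simp)]
    simp only [absorb_narrow_alt]
    rw [loopA]
    have hB : t.foldl (stepB min_w) [h] = (t.foldl (stepA min_w) ([h], false)).1 :=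
      (foldl_stepA_fst min_w t [h] false).symm
    by_cases hc : (passA min_w (h :: t)).2 = true
    · rw [dif_pos hc]
      -- the pass changed something: its output satisfies the wide-tail invariant
      have hfst : (passA min_w (h :: t)).1 = (t.foldl (stepA min_w) ([h], false)).1.reverse := rfl
      have hne : (t.foldl (stepA min_w) ([h], false)).1 ≠ [] :=
        foldl_stepA_ne_nil min_w t [h] false (by simp)
      have hwt : ∀ l ∈ (t.foldl (stepA min_w) ([h], false)).1.tail, ¬ Nrw min_w l :=
        foldl_stepA_wideTail min_w t [h] false (by simp)
      rw [hfst, loopA_eq_absorbTailRev min_w _ _ (le_refl _) hne hwt, hB]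
    · rw [dif_neg hc]
      -- no change: the pass returned h :: t, whose tail is all wide
      have hc' : (t.foldl (stepA min_w) ([h], false)).2 = false := by
        simpa [passA] using (by simpa using hc : ¬ (passA min_w (h :: t)).2 = true)
      obtain ⟨heq, hts⟩ := foldl_stepA_unchanged min_w t [h] false hc'
      have hfst : (passA min_w (h :: t)).1 = h :: t := by
        simp only [passA, heq]
        simp
      rw [hfst, hB, heq]
      -- absorbTailRev is the identity here: head of t.reverse ++ [h] is wide (or the list is [h])
      cases t with
      | nil => simp [absorbTailRev]
      | cons s ts =>
        have : absorbTailRev min_w ((s :: ts).reverse ++ [h]) = (s :: ts).reverse ++ [h] := by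
          obtain ⟨x, y, hxy⟩ : ∃ x y, (s :: ts).reverse = x :: y := by
            cases hr : (s :: ts).reverse with
            | nil => simp at hr
            | cons x y => exact ⟨x, y, rfl⟩
          have hxw : ¬ Nrw min_w x := by
            apply hts
            have : x ∈ (s :: ts).reverse := by rw [hxy]; simp
            exact List.mem_reverse.mp this
          rw [hxy]
          cases y with
          | nil => simp only [List.cons_append, List.nil_append]
                   rw [absorbTailRev, if_neg (by simpa [Nrw] using hxw)]
          | cons z w => simp only [List.cons_append]
                        rw [absorbTailRev, if_neg (by simpa [Nrw] using hxw)]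
        have h2 : (s :: ts).reverse ++ [h] = ts.reverse ++ [s, h] := by simp
        rw [h2] at this
        simp [this]
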